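-- pv_equiv track=rewrite | github.com/sujxxll/Assignment_PrimeNumerics | backend/diagnosis_engine/bert_engine.py | _detect_anatomy
-- ===== SOURCE A (Python) =====
-- DISEASE_ANCHOR_TERMS = {
--     "disease", "disorder", "syndrome", "cancer", "carcinoma", "tumor",
--     "tumour", "lymphoma", "leukemia", "leukaemia", "sarcoma", "melanoma",
--     "diabetes", "hypertension", "hypotension", "infection", "pneumonia",
--     "sepsis", "bacteremia", "viremia", "meningitis", "encephalitis",
--     "stroke", "infarction", "ischemia", "failure", "insufficiency",
--     "stenosis", "regurgitation", "prolapse", "rupture",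
--     "fracture", "dislocation", "injury", "trauma",
--     "arthritis", "osteoporosis", "spondylosis", "fibromyalgia",
--     "asthma", "copd", "emphysema", "bronchitis", "fibrosis",
--     "hepatitis", "cirrhosis", "pancreatitis", "colitis", "gastritis",
--     "nephropathy", "neuropathy", "myopathy", "cardiomyopathy",
--     "retinopathy", "encephalopathy",
--     "sclerosis", "dementia", "alzheimer", "parkinson", "epilepsy",
--     "hypothyroidism", "hyperthyroidism", "addison", "cushing",
--     "anemia", "anaemia", "thrombocytopenia", "leukopenia",
--     "thrombosis", "embolism", "atherosclerosis", "hypertrophy",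
--     "malignancy", "metastasis", "abscess", "hernia", "ulcer", "polyp",
--     "cyst", "calculus", "stones", "calcification",
--     "allergy", "anaphylaxis", "autoimmune", "immunodeficiency",
--     "hiv", "aids", "tuberculosis", "malaria", "dengue", "typhoid",
--     "fibrillation", "tachycardia", "bradycardia", "arrhythmia",
--     "flutter", "block", "dissection",
-- }
--
-- ANATOMY_TERMS = {
--     "heart", "lung", "lungs", "liver", "kidney", "kidneys", "brain",
--     "spinal cord", "spine", "vertebra", "vertebrae",
--     "stomach", "intestine", "intestines", "colon", "rectum", "bowel",
--     "pancreas", "gallbladder", "bladder", "uterus", "ovary", "ovaries",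
--     "prostate", "testis", "testes", "breast", "thyroid", "adrenal",
--     "spleen", "bone marrow", "lymph node", "lymph nodes",
--     "artery", "arteries", "vein", "veins", "aorta", "coronary",
--     "ventricle", "atrium", "mitral valve", "aortic valve",
--     "trachea", "bronchus", "bronchi", "pleura", "diaphragm",
--     "esophagus", "oesophagus", "duodenum", "jejunum", "ileum",
--     "appendix", "peritoneum",
--     "femur", "tibia", "fibula", "humerus", "radius", "ulna",
--     "skull", "sternum", "rib", "ribs", "pelvis", "clavicle",
--     "knee", "hip", "shoulder", "elbow", "ankle", "wrist",
--     "skin", "muscle", "tendon", "ligament", "cartilage", "nerve",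
--     "retina", "cornea", "lens", "optic nerve",
--     "cochlea", "eardrum",
--     "cerebrum", "cerebellum", "brainstem", "hypothalamus", "thalamus",
--     "frontal lobe", "parietal lobe", "temporal lobe", "occipital lobe",
--     "left ventricle", "right ventricle", "left atrium", "right atrium",
--     "lumbar", "thoracic", "cervical",
-- }
--
-- def _detect_anatomy(entities: dict) -> dict:
--     diseases = set(entities.get("disease", set()))
--     symptoms = set(entities.get("symptom", set()))
--     anatomy = set(entities.get("anatomy", set()))
--     to_move = set()
--
--     for source in (diseases, symptoms):
--         for entity in source:
--             el = entity.lower().strip()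
--             if any(term == el or term in el for term in ANATOMY_TERMS):
--                 if not any(anchor in el for anchor in DISEASE_ANCHOR_TERMS):
--                     to_move.add(entity)
--
--     entities["disease"] = diseases - to_move
--     entities["symptom"] = symptoms - to_move
--     entities["anatomy"] = anatomy | to_move
--     return entities
-- ===== SOURCE B (Python) =====
-- # Term tables precompiled as a first-letter bucket index (bucket = comma-joined
-- # CSV string, split once at import); each entity is tested by a positional scan
-- # that only tries the terms starting with the character at that position, and
-- # each source set is partitioned in one kept/moved pass (no to-move set and no
-- # set differences).
--
-- _ANAT_BUCKETS = {
--     'a': "adrenal,ankle,aorta,aortic valve,appendix,arteries,artery,atrium",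
--     'b': "bladder,bone marrow,bowel,brain,brainstem,breast,bronchi,bronchus",
--     'c': "cartilage,cerebellum,cerebrum,cervical,clavicle,cochlea,colon,cornea,coronary",
--     'd': "diaphragm,duodenum",
--     'e': "eardrum,elbow,esophagus",
--     'f': "femur,fibula,frontal lobe",
--     'g': "gallbladder",
--     'h': "heart,hip,humerus,hypothalamus",
--     'i': "ileum,intestine,intestines",
--     'j': "jejunum",
--     'k': "kidney,kidneys,knee",
--     'l': "left atrium,left ventricle,lens,ligament,liver,lumbar,lung,lungs,lymph node,lymph nodes",
--     'm': "mitral valve,muscle",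
--     'n': "nerve",
--     'o': "occipital lobe,oesophagus,optic nerve,ovaries,ovary",
--     'p': "pancreas,parietal lobe,pelvis,peritoneum,pleura,prostate",
--     'r': "radius,rectum,retina,rib,ribs,right atrium,right ventricle",
--     's': "shoulder,skin,skull,spinal cord,spine,spleen,sternum,stomach",
--     't': "temporal lobe,tendon,testes,testis,thalamus,thoracic,thyroid,tibia,trachea",
--     'u': "ulna,uterus",
--     'v': "vein,veins,ventricle,vertebra,vertebrae",
--     'w': "wrist",
-- }
--
-- _ANCHOR_BUCKETS = {
--     'a': "abscess,addison,aids,allergy,alzheimer,anaemia,anaphylaxis,anemia,arrhythmia,arthritis,asthma,atherosclerosis,autoimmune",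
--     'b': "bacteremia,block,bradycardia,bronchitis",
--     'c': "calcification,calculus,cancer,carcinoma,cardiomyopathy,cirrhosis,colitis,copd,cushing,cyst",
--     'd': "dementia,dengue,diabetes,disease,dislocation,disorder,dissection",
--     'e': "embolism,emphysema,encephalitis,encephalopathy,epilepsy",
--     'f': "failure,fibrillation,fibromyalgia,fibrosis,flutter,fracture",
--     'g': "gastritis",
--     'h': "hepatitis,hernia,hiv,hypertension,hyperthyroidism,hypertrophy,hypotension,hypothyroidism",
--     'i': "immunodeficiency,infarction,infection,injury,insufficiency,ischemia",
--     'l': "leukaemia,leukemia,leukopenia,lymphoma",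
--     'm': "malaria,malignancy,melanoma,meningitis,metastasis,myopathy",
--     'n': "nephropathy,neuropathy",
--     'o': "osteoporosis",
--     'p': "pancreatitis,parkinson,pneumonia,polyp,prolapse",
--     'r': "regurgitation,retinopathy,rupture",
--     's': "sarcoma,sclerosis,sepsis,spondylosis,stenosis,stones,stroke,syndrome",
--     't': "tachycardia,thrombocytopenia,thrombosis,trauma,tuberculosis,tumor,tumour,typhoid",
--     'u': "ulcer",
--     'v': "viremia",
-- }
--
--
-- def _index(buckets):
--     return {c: csv.split(",") for c, csv in buckets.items()}
--
--
-- _ANAT_IDX = _index(_ANAT_BUCKETS)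
-- _ANCHOR_IDX = _index(_ANCHOR_BUCKETS)
--
--
-- def _hits(el, idx):
--     # does any indexed term occur as a substring of el?  scan positions,
--     # trying only the terms whose first character matches
--     return any(el.startswith(t, j)
--                for j, c in enumerate(el)
--                for t in idx.get(c, ()))
--
--
-- def _should_move(entity):
--     el = entity.lower().strip()
--     return _hits(el, _ANAT_IDX) and not _hits(el, _ANCHOR_IDX)
--
--
-- def _detect_anatomy(entities: dict) -> dict:
--     moved = set()
--     for key in ("disease", "symptom"):
--         kept = set()
--         for entity in set(entities.get(key, set())):
--             if _should_move(entity):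
--                 moved.add(entity)
--             else:
--                 kept.add(entity)
--         entities[key] = kept
--     entities["anatomy"] = set(entities.get("anatomy", set())) | moved
--     return entities
-- ===== Notes on version B (the rewrite author's own statement) =====
-- stated objective: alternative
-- what changed: B replaces A's per-entity scan of all ~200 terms (one substring test per term) and its to-move-set/difference/union bookkeeping by a precompiled first-letter bucket table (each bucket a comma-joined CSV string split once at load) probed by a positional scan that only tries the terms starting with the character at that position, and partitions each source set in a single kept/moved pass.
import Mathlib
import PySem

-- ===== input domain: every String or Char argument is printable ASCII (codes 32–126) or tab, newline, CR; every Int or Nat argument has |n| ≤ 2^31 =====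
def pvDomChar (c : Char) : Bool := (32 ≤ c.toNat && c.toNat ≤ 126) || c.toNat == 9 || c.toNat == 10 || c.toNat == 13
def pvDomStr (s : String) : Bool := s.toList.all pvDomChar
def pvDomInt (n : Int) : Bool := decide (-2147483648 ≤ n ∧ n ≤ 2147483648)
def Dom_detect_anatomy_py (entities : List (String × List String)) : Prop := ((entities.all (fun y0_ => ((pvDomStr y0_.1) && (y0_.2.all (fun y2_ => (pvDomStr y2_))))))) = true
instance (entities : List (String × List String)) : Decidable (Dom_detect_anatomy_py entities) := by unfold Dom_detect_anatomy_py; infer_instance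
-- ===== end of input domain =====

-- ===== PORT A =====
def pvAnchorTerms : List String :=
  ["disease", "disorder", "syndrome", "cancer", "carcinoma", "tumor", "tumour", "lymphoma", "leukemia", "leukaemia", "sarcoma", "melanoma", "diabetes", "hypertension", "hypotension", "infection", "pneumonia", "sepsis", "bacteremia", "viremia", "meningitis", "encephalitis", "stroke", "infarction", "ischemia", "failure", "insufficiency", "stenosis", "regurgitation", "prolapse", "rupture", "fracture", "dislocation", "injury", "trauma", "arthritis", "osteoporosis", "spondylosis", "fibromyalgia", "asthma", "copd", "emphysema", "bronchitis", "fibrosis", "hepatitis", "cirrhosis", "pancreatitis", "colitis", "gastritis", "nephropathy", "neuropathy", "myopathy", "cardiomyopathy", "retinopathy", "encephalopathy", "sclerosis", "dementia", "alzheimer", "parkinson", "epilepsy", "hypothyroidism", "hyperthyroidism", "addison", "cushing", "anemia", "anaemia", "thrombocytopenia", "leukopenia", "thrombosis", "embolism", "atherosclerosis", "hypertrophy", "malignancy", "metastasis", "abscess", "hernia", "ulcer", "polyp", "cyst", "calculus", "stones", "calcification", "allergy", "anaphylaxis", "autoimmune", "immunodeficiency", "hiv", "aids", "tuberculosis", "malaria",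 "dengue", "typhoid", "fibrillation", "tachycardia", "bradycardia", "arrhythmia", "flutter", "block", "dissection"]

def pvAnatomyTerms : List String :=
  ["heart", "lung", "lungs", "liver", "kidney", "kidneys", "brain", "spinal cord", "spine", "vertebra", "vertebrae", "stomach", "intestine", "intestines", "colon", "rectum", "bowel", "pancreas", "gallbladder", "bladder", "uterus", "ovary", "ovaries", "prostate", "testis", "testes", "breast", "thyroid", "adrenal", "spleen", "bone marrow", "lymph node", "lymph nodes", "artery", "arteries", "vein", "veins", "aorta", "coronary", "ventricle", "atrium", "mitral valve", "aortic valve", "trachea", "bronchus", "bronchi", "pleura", "diaphragm", "esophagus", "oesophagus", "duodenum", "jejunum", "ileum", "appendix", "peritoneum", "femur", "tibia", "fibula", "humerus", "radius", "ulna", "skull", "sternum", "rib", "ribs", "pelvis", "clavicle", "knee", "hip", "shoulder", "elbow", "ankle", "wrist", "skin", "muscle", "tendon", "ligament", "cartilage", "nerve", "retina", "cornea", "lens", "optic nerve", "cochlea", "eardrum", "cerebrum", "cerebellum", "brainstem", "hypothalamus", "thalamus", "frontal lobe", "parietal lobe", "temporal lobe", "occipital lobe", "left ventricle", "right ventricle",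 "left atrium", "right atrium", "lumbar", "thoracic", "cervical"]

-- Port of A: build the to-move set by scanning every term per entity, then set difference/union.
def detect_anatomy_py (entities : List (String × List String)) : List (String × List String) :=
  let d := PySem.Dict.ofList entities
  let diseases := PySem.Set.ofList (d.getD "disease" [])
  let symptoms := PySem.Set.ofList (d.getD "symptom" [])
  let anatomy  := PySem.Set.ofList (d.getD "anatomy" [])
  let to_move : PySem.Set String :=
    [diseases, symptoms].foldl (fun tm source =>
      source.foldl (fun tm entity =>
        let el := PySem.Str.strip (PySem.Str.lower entity)
        if pvAnatomyTerms.any (fun term => term == el || PySem.Str.isIn term el) then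
          if !(pvAnchorTerms.any (fun anchor => PySem.Str.isIn anchor el)) then
            PySem.Set.add tm entity
          else tm
        else tm) tm) PySem.Set.empty
  let d := d.insert "disease" (PySem.Set.diff diseases to_move)
  let d := d.insert "symptom" (PySem.Set.diff symptoms to_move)
  let d := d.insert "anatomy" (PySem.Set.union anatomy to_move)
  d.items

-- ===== PORT B =====
-- B (one honest line): the term tables are precompiled first-letter bucket tables (bucket =
-- comma-joined CSV string split once at load), each entity is tested by a positional scan over
-- only the terms starting with the character at that position, and each source set is
-- partitioned in a single kept/moved pass (no to-move set and no set differences);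
-- objective: alternative.

def pvAnatBuckets : List (Char × String) :=
  [('a', "adrenal,ankle,aorta,aortic valve,appendix,arteries,artery,atrium"), ('b', "bladder,bone marrow,bowel,brain,brainstem,breast,bronchi,bronchus"), ('c', "cartilage,cerebellum,cerebrum,cervical,clavicle,cochlea,colon,cornea,coronary"), ('d', "diaphragm,duodenum"), ('e', "eardrum,elbow,esophagus"), ('f', "femur,fibula,frontal lobe"), ('g', "gallbladder"), ('h', "heart,hip,humerus,hypothalamus"), ('i', "ileum,intestine,intestines"), ('j', "jejunum"), ('k', "kidney,kidneys,knee"), ('l', "left atrium,left ventricle,lens,ligament,liver,lumbar,lung,lungs,lymph node,lymph nodes"), ('m', "mitral valve,muscle"), ('n', "nerve"), ('o', "occipital lobe,oesophagus,optic nerve,ovaries,ovary"), ('p', "pancreas,parietal lobe,pelvis,peritoneum,pleura,prostate"), ('r', "radius,rectum,retina,rib,ribs,right atrium,right ventricle"), ('s', "shoulder,skin,skull,spinal cord,spine,spleen,sternum,stomach"), ('t', "temporal lobe,tendon,testes,testis,thalamus,thoracic,thyroid,tibia,trachea"), ('u', "ulna,uterus"), ('v', "vein,veins,ventricle,vertebra,vertebrae"),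 ('w', "wrist")]

def pvAnchorBuckets : List (Char × String) :=
  [('a', "abscess,addison,aids,allergy,alzheimer,anaemia,anaphylaxis,anemia,arrhythmia,arthritis,asthma,atherosclerosis,autoimmune"), ('b', "bacteremia,block,bradycardia,bronchitis"), ('c', "calcification,calculus,cancer,carcinoma,cardiomyopathy,cirrhosis,colitis,copd,cushing,cyst"), ('d', "dementia,dengue,diabetes,disease,dislocation,disorder,dissection"), ('e', "embolism,emphysema,encephalitis,encephalopathy,epilepsy"), ('f', "failure,fibrillation,fibromyalgia,fibrosis,flutter,fracture"), ('g', "gastritis"), ('h', "hepatitis,hernia,hiv,hypertension,hyperthyroidism,hypertrophy,hypotension,hypothyroidism"), ('i', "immunodeficiency,infarction,infection,injury,insufficiency,ischemia"), ('l', "leukaemia,leukemia,leukopenia,lymphoma"), ('m', "malaria,malignancy,melanoma,meningitis,metastasis,myopathy"), ('n', "nephropathy,neuropathy"), ('o', "osteoporosis"), ('p', "pancreatitis,parkinson,pneumonia,polyp,prolapse"), ('r', "regurgitation,retinopathy,rupture"), ('s', "sarcoma,sclerosis,sepsis,spondylosis,stenosis,stones,stroke,syndrome"), ('t', "tachycardia,thrombocytopenia,thrombosis,trauma,tuberculosis,tumor,tumour,typhoid"),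 ('u', "ulcer"), ('v', "viremia")]

-- _index: {c: csv.split(",") for c, csv in buckets.items()}
def pvIndexOf (buckets : List (Char × String)) : PySem.Dict Char (List String) :=
  (PySem.Dict.ofList buckets).items.foldl
    (fun d kv => d.insert kv.1 ((PySem.Str.split? kv.2 ",").getD [])) PySem.Dict.empty

def pvAnatIdx : PySem.Dict Char (List String) := pvIndexOf pvAnatBuckets
def pvAnchorIdx : PySem.Dict Char (List String) := pvIndexOf pvAnchorBuckets

-- _hits: any(el.startswith(t, j) for j, c in enumerate(el) for t in idx.get(c, ()))
-- el.startswith(t, j) with 0 <= j < len(el) is exactly: t is a prefix of el[j:]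
def pvHits (el : String) (idx : PySem.Dict Char (List String)) : Bool :=
  (PySem.List.enumerate el.toList 0).any (fun jc =>
    (idx.getD jc.2 []).any (fun t =>
      PySem.Chars.startswith (el.toList.drop jc.1.toNat) t.toList))

-- _should_move
def pvShouldMove (entity : String) : Bool :=
  let el := PySem.Str.strip (PySem.Str.lower entity)
  pvHits el pvAnatIdx && !(pvHits el pvAnchorIdx)

def detect_anatomy_py_alt (entities : List (String × List String)) : List (String × List String) :=
  let d0 := PySem.Dict.ofList entities
  let res := ["disease", "symptom"].foldl
    (fun (acc : PySem.Dict String (List String) × PySem.Set String) key =>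
      let km := (PySem.Set.ofList (acc.1.getD key [])).foldl
        (fun (km : PySem.Set String × PySem.Set String) entity =>
          if pvShouldMove entity then (km.1, PySem.Set.add km.2 entity)
          else (PySem.Set.add km.1 entity, km.2))
        (PySem.Set.empty, acc.2)
      (acc.1.insert key km.1, km.2))
    (d0, PySem.Set.empty)
  let d := res.1.insert "anatomy"
    (PySem.Set.union (PySem.Set.ofList (res.1.getD "anatomy" [])) res.2)
  d.items

-- ===== PRECONDITION & SPEC =====
def Spec_detect_anatomy_py (entities : List (String × List String)) (out : List (String × List String)) : Prop := out = detect_anatomy_py_alt entities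
instance (entities : List (String × List String)) (out : List (String × List String)) : Decidable (Spec_detect_anatomy_py entities out) := by unfold Spec_detect_anatomy_py; infer_instance

-- ===== CLAIM (what is proved, stated in full; the proofs are below) =====
def Claim_equal_detect_anatomy_py : Prop := ∀ (entities : List (String × List String)), Dom_detect_anatomy_py entities → Spec_detect_anatomy_py entities (detect_anatomy_py entities)

-- ===== LEMMAS AND PROOFS =====

-- A's per-entity condition, as one Bool
def pvCondA (entity : String) : Bool :=
  let el := PySem.Str.strip (PySem.Str.lower entity)
  (pvAnatomyTerms.any (fun term => term == el || PySem.Str.isIn term el)) &&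
    !(pvAnchorTerms.any (fun anchor => PySem.Str.isIn anchor el))

-- t[0] of a non-empty term
def pvHeadChar (t : String) : Char := (PySem.Str.pyGet? t 0).getD ' '

theorem pvAnat_ne_nil : ∀ t ∈ pvAnatomyTerms, t.toList ≠ [] := by decide

theorem pvAnchor_ne_nil : ∀ t ∈ pvAnchorTerms, t.toList ≠ [] := by decide

def pvAnatSorted : List String := ["adrenal", "ankle", "aorta", "aortic valve", "appendix", "arteries", "artery", "atrium", "bladder", "bone marrow", "bowel", "brain", "brainstem", "breast", "bronchi", "bronchus", "cartilage", "cerebellum", "cerebrum", "cervical", "clavicle", "cochlea", "colon", "cornea", "coronary", "diaphragm", "duodenum", "eardrum", "elbow", "esophagus", "femur", "fibula", "frontal lobe", "gallbladder", "heart", "hip", "humerus", "hypothalamus", "ileum", "intestine", "intestines", "jejunum", "kidney", "kidneys", "knee", "left atrium", "left ventricle", "lens", "ligament", "liver", "lumbar", "lung", "lungs", "lymph node", "lymph nodes", "mitral valve", "muscle", "nerve", "occipital lobe", "oesophagus", "optic nerve", "ovaries", "ovary", "pancreas", "parietal lobe", "pelvis", "peritoneum", "pleura", "prostate", "radius", "rectum",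 "retina", "rib", "ribs", "right atrium", "right ventricle", "shoulder", "skin", "skull", "spinal cord", "spine", "spleen", "sternum", "stomach", "temporal lobe", "tendon", "testes", "testis", "thalamus", "thoracic", "thyroid", "tibia", "trachea", "ulna", "uterus", "vein", "veins", "ventricle", "vertebra", "vertebrae", "wrist"]

def pvAnchorSorted : List String := ["abscess", "addison", "aids", "allergy", "alzheimer", "anaemia", "anaphylaxis", "anemia", "arrhythmia", "arthritis", "asthma", "atherosclerosis", "autoimmune", "bacteremia", "block", "bradycardia", "bronchitis", "calcification", "calculus", "cancer", "carcinoma", "cardiomyopathy", "cirrhosis", "colitis", "copd", "cushing", "cyst", "dementia", "dengue", "diabetes", "disease", "dislocation", "disorder", "dissection", "embolism", "emphysema", "encephalitis", "encephalopathy", "epilepsy", "failure", "fibrillation", "fibromyalgia", "fibrosis", "flutter", "fracture", "gastritis", "hepatitis", "hernia", "hiv", "hypertension", "hyperthyroidism", "hypertrophy", "hypotension", "hypothyroidism", "immunodeficiency", "infarction", "infection", "injury", "insufficiency", "ischemia", "leukaemia", "leukemia", "leukopenia", "lymphoma", "malaria", "malignancy", "melanoma", "meningitis", "metastasis", "myopathy",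 "nephropathy", "neuropathy", "osteoporosis", "pancreatitis", "parkinson", "pneumonia", "polyp", "prolapse", "regurgitation", "retinopathy", "rupture", "sarcoma", "sclerosis", "sepsis", "spondylosis", "stenosis", "stones", "stroke", "syndrome", "tachycardia", "thrombocytopenia", "thrombosis", "trauma", "tuberculosis", "tumor", "tumour", "typhoid", "ulcer", "viremia"]

set_option maxRecDepth 40000 in
set_option maxHeartbeats 1600000 in
theorem pvAnatPerm : pvAnatSorted.Perm pvAnatomyTerms := by decide

set_option maxRecDepth 40000 in
set_option maxHeartbeats 1600000 in
theorem pvAnchorPerm : pvAnchorSorted.Perm pvAnchorTerms := by decide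

-- the two bucket tables, split: computed once
set_option maxRecDepth 40000 in
set_option maxHeartbeats 4000000 in
theorem pvAnatIdx_eq : pvAnatIdx = PySem.Dict.mk [('a', ["adrenal", "ankle", "aorta", "aortic valve", "appendix", "arteries", "artery", "atrium"]), ('b', ["bladder", "bone marrow", "bowel", "brain", "brainstem", "breast", "bronchi", "bronchus"]), ('c', ["cartilage", "cerebellum", "cerebrum", "cervical", "clavicle", "cochlea", "colon", "cornea", "coronary"]), ('d', ["diaphragm", "duodenum"]), ('e', ["eardrum", "elbow", "esophagus"]), ('f', ["femur", "fibula", "frontal lobe"]), ('g', ["gallbladder"]), ('h', ["heart", "hip", "humerus", "hypothalamus"]), ('i', ["ileum", "intestine", "intestines"]), ('j', ["jejunum"]), ('k', ["kidney", "kidneys", "knee"]), ('l', ["left atrium", "left ventricle", "lens", "ligament", "liver", "lumbar", "lung", "lungs", "lymph node", "lymph nodes"]), ('m', ["mitral valve", "muscle"]), ('n', ["nerve"]), ('o', ["occipital lobe", "oesophagus", "optic nerve", "ovaries", "ovary"]), ('p', ["pancreas", "parietal lobe", "pelvis", "peritoneum", "pleura", "prostate"]), ('r', ["radius", "rectum",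 "retina", "rib", "ribs", "right atrium", "right ventricle"]), ('s', ["shoulder", "skin", "skull", "spinal cord", "spine", "spleen", "sternum", "stomach"]), ('t', ["temporal lobe", "tendon", "testes", "testis", "thalamus", "thoracic", "thyroid", "tibia", "trachea"]), ('u', ["ulna", "uterus"]), ('v', ["vein", "veins", "ventricle", "vertebra", "vertebrae"]), ('w', ["wrist"])] := by decide

set_option maxRecDepth 40000 in
set_option maxHeartbeats 4000000 in
theorem pvAnchorIdx_eq : pvAnchorIdx = PySem.Dict.mk [('a', ["abscess", "addison", "aids", "allergy", "alzheimer", "anaemia", "anaphylaxis", "anemia", "arrhythmia", "arthritis", "asthma", "atherosclerosis", "autoimmune"]), ('b', ["bacteremia", "block", "bradycardia", "bronchitis"]), ('c', ["calcification", "calculus", "cancer", "carcinoma", "cardiomyopathy", "cirrhosis", "colitis", "copd", "cushing", "cyst"]), ('d', ["dementia", "dengue", "diabetes", "disease", "dislocation", "disorder", "dissection"]), ('e', ["embolism", "emphysema", "encephalitis", "encephalopathy", "epilepsy"]), ('f', ["failure", "fibrillation", "fibromyalgia", "fibrosis", "flutter", "fracture"]), ('g', ["gastritis"]), ('h', ["hepatitis",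 "hernia", "hiv", "hypertension", "hyperthyroidism", "hypertrophy", "hypotension", "hypothyroidism"]), ('i', ["immunodeficiency", "infarction", "infection", "injury", "insufficiency", "ischemia"]), ('l', ["leukaemia", "leukemia", "leukopenia", "lymphoma"]), ('m', ["malaria", "malignancy", "melanoma", "meningitis", "metastasis", "myopathy"]), ('n', ["nephropathy", "neuropathy"]), ('o', ["osteoporosis"]), ('p', ["pancreatitis", "parkinson", "pneumonia", "polyp", "prolapse"]), ('r', ["regurgitation", "retinopathy", "rupture"]), ('s', ["sarcoma", "sclerosis", "sepsis", "spondylosis", "stenosis", "stones", "stroke", "syndrome"]), ('t', ["tachycardia", "thrombocytopenia", "thrombosis", "trauma", "tuberculosis", "tumor", "tumour", "typhoid"]), ('u', ["ulcer"]), ('v', ["viremia"])] := by decide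

set_option maxRecDepth 40000 in
set_option maxHeartbeats 1600000 in
theorem pvAnat_heads : ∀ t ∈ pvAnatSorted, pvHeadChar t ∈ ['a', 'b', 'c', 'd', 'e', 'f', 'g', 'h', 'i', 'j', 'k', 'l', 'm', 'n', 'o', 'p', 'r', 's', 't', 'u', 'v', 'w'] := by decide

set_option maxRecDepth 40000 in
set_option maxHeartbeats 1600000 in
theorem pvAnchor_heads : ∀ t ∈ pvAnchorSorted, pvHeadChar t ∈ ['a', 'b', 'c', 'd', 'e', 'f', 'g', 'h', 'i', 'l', 'm', 'n', 'o', 'p', 'r', 's', 't', 'u', 'v'] := by decide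

set_option maxRecDepth 40000 in
set_option maxHeartbeats 16000000 in
theorem getD_anat (c : Char) :
    pvAnatIdx.getD c [] = pvAnatSorted.filter (fun t => pvHeadChar t == c) := by
  rw [pvAnatIdx_eq]
  simp only [PySem.Dict.getD, PySem.Dict.get?_mk_cons]
  by_cases ha : ('a' == c) = true
  · have hc := eq_of_beq ha; subst hc; decide
  rw [if_neg ha]
  by_cases hb : ('b' == c) = true
  · have hc := eq_of_beq hb; subst hc; decide
  rw [if_neg hb]
  by_cases hc : ('c' == c) = true
  · have hc := eq_of_beq hc; subst hc; decide
  rw [if_neg hc]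
  by_cases hd : ('d' == c) = true
  · have hc := eq_of_beq hd; subst hc; decide
  rw [if_neg hd]
  by_cases he : ('e' == c) = true
  · have hc := eq_of_beq he; subst hc; decide
  rw [if_neg he]
  by_cases hf : ('f' == c) = true
  · have hc := eq_of_beq hf; subst hc; decide
  rw [if_neg hf]
  by_cases hg : ('g' == c) = true
  · have hc := eq_of_beq hg; subst hc; decide
  rw [if_neg hg]
  by_cases hh : ('h' == c) = true
  · have hc := eq_of_beq hh; subst hc; decide
  rw [if_neg hh]
  by_cases hi : ('i' == c) = true
  · have hc := eq_of_beq hi; subst hc; decide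
  rw [if_neg hi]
  by_cases hj : ('j' == c) = true
  · have hc := eq_of_beq hj; subst hc; decide
  rw [if_neg hj]
  by_cases hk : ('k' == c) = true
  · have hc := eq_of_beq hk; subst hc; decide
  rw [if_neg hk]
  by_cases hl : ('l' == c) = true
  · have hc := eq_of_beq hl; subst hc; decide
  rw [if_neg hl]
  by_cases hm : ('m' == c) = true
  · have hc := eq_of_beq hm; subst hc; decide
  rw [if_neg hm]
  by_cases hn : ('n' == c) = true
  · have hc := eq_of_beq hn; subst hc; decide
  rw [if_neg hn]
  by_cases ho : ('o' == c) = true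
  · have hc := eq_of_beq ho; subst hc; decide
  rw [if_neg ho]
  by_cases hp : ('p' == c) = true
  · have hc := eq_of_beq hp; subst hc; decide
  rw [if_neg hp]
  by_cases hr : ('r' == c) = true
  · have hc := eq_of_beq hr; subst hc; decide
  rw [if_neg hr]
  by_cases hs : ('s' == c) = true
  · have hc := eq_of_beq hs; subst hc; decide
  rw [if_neg hs]
  by_cases ht : ('t' == c) = true
  · have hc := eq_of_beq ht; subst hc; decide
  rw [if_neg ht]
  by_cases hu : ('u' == c) = true
  · have hc := eq_of_beq hu; subst hc; decide
  rw [if_neg hu]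
  by_cases hv : ('v' == c) = true
  · have hc := eq_of_beq hv; subst hc; decide
  rw [if_neg hv]
  by_cases hw : ('w' == c) = true
  · have hc := eq_of_beq hw; subst hc; decide
  rw [if_neg hw]
  simp only [PySem.Dict.get?, List.find?_nil, Option.map_none, Option.getD_none]
  symm; rw [List.filter_eq_nil_iff]; intro t ht
  have hk := pvAnat_heads t ht
  simp only [List.mem_cons, List.not_mem_nil, or_false] at hk
  simp only [beq_iff_eq]
  intro heq; rw [heq] at hk
  rcases hk with rfl | rfl | rfl | rfl | rfl | rfl | rfl | rfl | rfl | rfl | rfl | rfl | rfl | rfl | rfl | rfl | rfl | rfl | rfl | rfl | rfl | rfl <;> simp_all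

set_option maxRecDepth 40000 in
set_option maxHeartbeats 16000000 in
theorem getD_anchor (c : Char) :
    pvAnchorIdx.getD c [] = pvAnchorSorted.filter (fun t => pvHeadChar t == c) := by
  rw [pvAnchorIdx_eq]
  simp only [PySem.Dict.getD, PySem.Dict.get?_mk_cons]
  by_cases ha : ('a' == c) = true
  · have hc := eq_of_beq ha; subst hc; decide
  rw [if_neg ha]
  by_cases hb : ('b' == c) = true
  · have hc := eq_of_beq hb; subst hc; decide
  rw [if_neg hb]
  by_cases hc : ('c' == c) = true
  · have hc := eq_of_beq hc; subst hc; decide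
  rw [if_neg hc]
  by_cases hd : ('d' == c) = true
  · have hc := eq_of_beq hd; subst hc; decide
  rw [if_neg hd]
  by_cases he : ('e' == c) = true
  · have hc := eq_of_beq he; subst hc; decide
  rw [if_neg he]
  by_cases hf : ('f' == c) = true
  · have hc := eq_of_beq hf; subst hc; decide
  rw [if_neg hf]
  by_cases hg : ('g' == c) = true
  · have hc := eq_of_beq hg; subst hc; decide
  rw [if_neg hg]
  by_cases hh : ('h' == c) = true
  · have hc := eq_of_beq hh; subst hc; decide
  rw [if_neg hh]
  by_cases hi : ('i' == c) = true
  · have hc := eq_of_beq hi; subst hc; decide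
  rw [if_neg hi]
  by_cases hl : ('l' == c) = true
  · have hc := eq_of_beq hl; subst hc; decide
  rw [if_neg hl]
  by_cases hm : ('m' == c) = true
  · have hc := eq_of_beq hm; subst hc; decide
  rw [if_neg hm]
  by_cases hn : ('n' == c) = true
  · have hc := eq_of_beq hn; subst hc; decide
  rw [if_neg hn]
  by_cases ho : ('o' == c) = true
  · have hc := eq_of_beq ho; subst hc; decide
  rw [if_neg ho]
  by_cases hp : ('p' == c) = true
  · have hc := eq_of_beq hp; subst hc; decide
  rw [if_neg hp]
  by_cases hr : ('r' == c) = true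
  · have hc := eq_of_beq hr; subst hc; decide
  rw [if_neg hr]
  by_cases hs : ('s' == c) = true
  · have hc := eq_of_beq hs; subst hc; decide
  rw [if_neg hs]
  by_cases ht : ('t' == c) = true
  · have hc := eq_of_beq ht; subst hc; decide
  rw [if_neg ht]
  by_cases hu : ('u' == c) = true
  · have hc := eq_of_beq hu; subst hc; decide
  rw [if_neg hu]
  by_cases hv : ('v' == c) = true
  · have hc := eq_of_beq hv; subst hc; decide
  rw [if_neg hv]
  simp only [PySem.Dict.get?, List.find?_nil, Option.map_none, Option.getD_none]
  symm; rw [List.filter_eq_nil_iff]; intro t ht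
  have hk := pvAnchor_heads t ht
  simp only [List.mem_cons, List.not_mem_nil, or_false] at hk
  simp only [beq_iff_eq]
  intro heq; rw [heq] at hk
  rcases hk with rfl | rfl | rfl | rfl | rfl | rfl | rfl | rfl | rfl | rfl | rfl | rfl | rfl | rfl | rfl | rfl | rfl | rfl | rfl <;> simp_all

theorem mem_anat (c : Char) (t : String) :
    t ∈ pvAnatIdx.getD c [] ↔ t ∈ pvAnatomyTerms ∧ pvHeadChar t = c := by
  rw [getD_anat]; simp [List.mem_filter, pvAnatPerm.mem_iff]

theorem mem_anchor (c : Char) (t : String) :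
    t ∈ pvAnchorIdx.getD c [] ↔ t ∈ pvAnchorTerms ∧ pvHeadChar t = c := by
  rw [getD_anchor]; simp [List.mem_filter, pvAnchorPerm.mem_iff]

theorem pvHeadChar_eq (t : String) (c : Char) (r : List Char) (h : t.toList = c :: r) :
    pvHeadChar t = c := by
  simp [pvHeadChar, PySem.Str.pyGet?, PySem.Chars.pyGet?, PySem.List.pyGet?, PySem.List.pyIdx?, h]

theorem hits_eq_any (idx : PySem.Dict Char (List String)) (terms : List String)
    (hmem : ∀ c t, t ∈ idx.getD c [] ↔ t ∈ terms ∧ pvHeadChar t = c)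
    (h : ∀ t ∈ terms, t.toList ≠ []) (el : String) :
    pvHits el idx = terms.any (fun t => PySem.Str.isIn t el) := by
  have key : pvHits el idx = true ↔
      terms.any (fun t => PySem.Str.isIn t el) = true := by
    constructor
    · intro hh
      rcases List.any_eq_true.mp hh with ⟨jc, hjc, hinner⟩
      rcases (PySem.List.mem_enumerate_iff _ _ _).mp hjc with ⟨k, hk, rfl⟩
      rcases List.any_eq_true.mp hinner with ⟨t, ht, hpre⟩
      rcases (hmem _ t).mp ht with ⟨htm, -⟩
      refine List.any_eq_true.mpr ⟨t, htm, ?_⟩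
      have hk' : ((0 : Int) + (k : Int)).toNat = k := by simp
      rw [hk'] at hpre
      have hpfx : t.toList <+: el.toList.drop k := by
        simpa [PySem.Chars.startswith, List.isPrefixOf_iff_prefix] using hpre
      have hin : PySem.Chars.isIn t.toList el.toList = true :=
        (PySem.Chars.exists_prefix_drop_iff_isIn _ _).mp ⟨k, hpfx⟩
      simpa [PySem.Str.isIn_eq] using hin
    · intro hh
      rcases List.any_eq_true.mp hh with ⟨t, htm, hin⟩
      have hin' : PySem.Chars.isIn t.toList el.toList = true := by
        simpa [PySem.Str.isIn_eq] using hin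
      rcases (PySem.Chars.exists_prefix_drop_iff_isIn t.toList el.toList).mpr hin' with ⟨j, hpfx⟩
      obtain ⟨c, r, hct⟩ : ∃ c r, t.toList = c :: r := by
        cases htl : t.toList with
        | nil => exact absurd htl (h t htm)
        | cons c r => exact ⟨c, r, rfl⟩
      rcases hpfx with ⟨u, hu⟩
      have hdrop : el.toList.drop j = c :: (r ++ u) := by
        rw [← hu, hct]; rfl
      have hjlt : j < el.toList.length := by
        by_contra hge
        have h0 : el.toList.drop j = [] := List.drop_eq_nil_of_le (by omega)
        rw [h0] at hdrop; exact absurd hdrop (by simp)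
      have hcel : el.toList[j] = c := by
        have h2 := List.drop_eq_getElem_cons hjlt
        rw [h2] at hdrop
        injection hdrop with h3 _
      refine List.any_eq_true.mpr ⟨((0 : Int) + (j : Int), el.toList[j]), ?_, ?_⟩
      · exact (PySem.List.mem_enumerate_iff _ _ _).mpr ⟨j, hjlt, rfl⟩
      · refine List.any_eq_true.mpr ⟨t, ?_, ?_⟩
        · exact (hmem _ t).mpr ⟨htm, by rw [pvHeadChar_eq t c r hct, hcel]⟩
        · have hj' : ((0 : Int) + (j : Int)).toNat = j := by simp
          simp only [hj']
          simp [PySem.Chars.startswith, List.isPrefixOf_iff_prefix]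
          exact ⟨u, hu⟩
  cases hA : pvHits el idx
  · cases hB : terms.any (fun t => PySem.Str.isIn t el)
    · rfl
    · exact absurd (key.mpr hB) (by simp [hA])
  · exact (key.mp hA).symm

theorem any_or_self (el : String) :
    (pvAnatomyTerms.any (fun term => term == el || PySem.Str.isIn term el)) =
      pvAnatomyTerms.any (fun term => PySem.Str.isIn term el) := by
  have hfun : (fun term => term == el || PySem.Str.isIn term el) =
      (fun term => PySem.Str.isIn term el) := by
    funext t
    by_cases h : t = el
    · subst h
      have hin : PySem.Chars.isIn t.toList t.toList = true :=
        (PySem.Chars.isIn_iff_infix _ _).mpr List.infix_rfl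
      simp [hin]
    · simp [h]
  rw [hfun]

theorem shouldMove_eq_condA (entity : String) : pvShouldMove entity = pvCondA entity := by
  rw [pvShouldMove, pvCondA,
      hits_eq_any pvAnatIdx pvAnatomyTerms mem_anat pvAnat_ne_nil,
      hits_eq_any pvAnchorIdx pvAnchorTerms mem_anchor pvAnchor_ne_nil,
      any_or_self]

-- loop shapes
theorem foldl_addIf {α : Type} [BEq α] (p : α → Bool) (src : List α) (tm : PySem.Set α) :
    src.foldl (fun tm e => if p e then PySem.Set.add tm e else tm) tm
      = PySem.Set.update tm (src.filter p) := by
  induction src generalizing tm with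
  | nil => rfl
  | cons x xs ih =>
    by_cases hx : p x = true <;>
      simp [List.foldl, List.filter, hx, ih, PySem.Set.update_cons]

theorem foldl_partition (p : String → Bool) (src : List String)
    (k m : PySem.Set String) :
    src.foldl (fun km e =>
        if p e then (km.1, PySem.Set.add km.2 e) else (PySem.Set.add km.1 e, km.2)) (k, m)
      = (PySem.Set.update k (src.filter (fun e => !p e)),
         PySem.Set.update m (src.filter p)) := by
  induction src generalizing k m with
  | nil => rfl
  | cons x xs ih =>
    by_cases hx : p x = true <;>
      simp [List.foldl, List.filter, hx, ih, PySem.Set.update_cons]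

theorem contains_T (c : String → Bool) (D S : List String) (x : String)
    (hx : x ∈ D ∨ x ∈ S) :
    (PySem.Set.update (PySem.Set.update PySem.Set.empty (D.filter c))
        (S.filter c)).contains x = c x := by
  cases hcx : c x
  · have hnot : x ∉ PySem.Set.update (PySem.Set.update PySem.Set.empty (D.filter c))
        (S.filter c) := by
      intro hmem
      rcases (PySem.Set.mem_update _ _ _).mp hmem with hmem' | hmem'
      · rcases (PySem.Set.mem_update _ _ _).mp hmem' with hmem'' | hmem''
        · simp [PySem.Set.empty] at hmem''
        · rw [List.mem_filter] at hmem''; simp [hcx] at hmem''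
      · rw [List.mem_filter] at hmem'; simp [hcx] at hmem'
    cases hcon : (PySem.Set.update (PySem.Set.update PySem.Set.empty (D.filter c))
        (S.filter c)).contains x
    · rfl
    · exact absurd ((PySem.Set.contains_iff _ _).mp hcon) hnot
  · refine (PySem.Set.contains_iff _ _).mpr ?_
    refine (PySem.Set.mem_update _ _ _).mpr ?_
    rcases hx with h | h
    · exact Or.inl ((PySem.Set.mem_update _ _ _).mpr
        (Or.inr (List.mem_filter.mpr ⟨h, hcx⟩)))
    · exact Or.inr (List.mem_filter.mpr ⟨h, hcx⟩)

theorem keep_eq (c : String → Bool) (D S X : List String) (hX : X.Nodup)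
    (hmem : ∀ x ∈ X, x ∈ D ∨ x ∈ S) :
    PySem.Set.diff X (PySem.Set.update (PySem.Set.update PySem.Set.empty (D.filter c))
        (S.filter c))
      = PySem.Set.update PySem.Set.empty (X.filter (fun x => !c x)) := by
  have hrhs : PySem.Set.update PySem.Set.empty (X.filter (fun x => !c x))
      = X.filter (fun x => !c x) := by
    show PySem.Set.update [] _ = _
    rw [PySem.Set.update_nil_left, PySem.Set.ofList_eq_self_of_nodup _ (hX.filter _)]
  rw [hrhs]
  show List.filter _ X = _
  refine List.filter_congr ?_
  intro x hx
  rw [contains_T c D S x (hmem x hx)]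

-- ===== VERDICT (by name: the statement is the Claim_ definition above) =====
set_option maxHeartbeats 1600000 in
theorem detect_anatomy_py_spec : Claim_equal_detect_anatomy_py := by
  intro entities _
  show detect_anatomy_py entities = detect_anatomy_py_alt entities
  have hsm : pvShouldMove = pvCondA := funext shouldMove_eq_condA
  have hbody : (fun (tm : PySem.Set String) (entity : String) =>
        if pvAnatomyTerms.any (fun term =>
            term == PySem.Str.strip (PySem.Str.lower entity) ||
              PySem.Str.isIn term (PySem.Str.strip (PySem.Str.lower entity))) then
          if !(pvAnchorTerms.any (fun anchor =>
              PySem.Str.isIn anchor (PySem.Str.strip (PySem.Str.lower entity)))) then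
            PySem.Set.add tm entity
          else tm
        else tm)
      = (fun tm entity => if pvCondA entity then PySem.Set.add tm entity else tm) := by
    funext tm e
    have hc : pvCondA e = ((pvAnatomyTerms.any (fun term =>
        term == PySem.Str.strip (PySem.Str.lower e) ||
          PySem.Str.isIn term (PySem.Str.strip (PySem.Str.lower e)))) &&
        !(pvAnchorTerms.any (fun anchor =>
          PySem.Str.isIn anchor (PySem.Str.strip (PySem.Str.lower e))))) := rfl
    rw [hc]
    cases pvAnatomyTerms.any (fun term =>
        term == PySem.Str.strip (PySem.Str.lower e) ||
          PySem.Str.isIn term (PySem.Str.strip (PySem.Str.lower e))) <;>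
      cases pvAnchorTerms.any (fun anchor =>
        PySem.Str.isIn anchor (PySem.Str.strip (PySem.Str.lower e))) <;> rfl
  simp only [detect_anatomy_py, detect_anatomy_py_alt, List.foldl, hbody, hsm]
  rw [foldl_addIf, foldl_addIf, foldl_partition, foldl_partition]
  rw [PySem.Dict.getD_insert_of_ne _ _ _ (by decide : ("symptom" : String) ≠ "disease")]
  rw [PySem.Dict.getD_insert_of_ne _ _ _ (by decide : ("anatomy" : String) ≠ "symptom")]
  rw [PySem.Dict.getD_insert_of_ne _ _ _ (by decide : ("anatomy" : String) ≠ "disease")]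
  rw [keep_eq pvCondA
        (PySem.Set.ofList ((PySem.Dict.ofList entities).getD "disease" []))
        (PySem.Set.ofList ((PySem.Dict.ofList entities).getD "symptom" []))
        (PySem.Set.ofList ((PySem.Dict.ofList entities).getD "disease" []))
        (PySem.Set.nodup_ofList _) (fun x hx => Or.inl hx),
      keep_eq pvCondA
        (PySem.Set.ofList ((PySem.Dict.ofList entities).getD "disease" []))
        (PySem.Set.ofList ((PySem.Dict.ofList entities).getD "symptom" []))
        (PySem.Set.ofList ((PySem.Dict.ofList entities).getD "symptom" []))
        (PySem.Set.nodup_ofList _) (fun x hx => Or.inr hx)]
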